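-- pv_equiv track=rewrite | github.com/markmclaren/Infracursions-demos | combined/generate_sources.py | get_year_range
-- ===== SOURCE A (Python) =====
-- def get_year_range(year):
--     """Map a year to its 5-year range"""
--     ranges = {
--         (1985, 1989): "1985_1989",
--         (1990, 1994): "1990_1994",
--         (1995, 1999): "1995_1999",
--         (2000, 2004): "2000_2004",
--         (2005, 2009): "2005_2009",
--         (2010, 2014): "2010_2014",
--         (2015, 2019): "2015_2019",
--         (2020, 2023): "2020_2023"
--     }
--
--     for range_tuple, range_name in ranges.items():
--         if range_tuple[0] <= year <= range_tuple[1]: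
--             return range_name
--     return None
-- ===== SOURCE B (Python) =====
-- _LABELS = {
--     1985: "1985_1989",
--     1990: "1990_1994",
--     1995: "1995_1999",
--     2000: "2000_2004",
--     2005: "2005_2009",
--     2010: "2010_2014",
--     2015: "2015_2019",
--     2020: "2020_2023",
-- }
--
-- def get_year_range(year):
--     """Map a year to its 5-year range"""
--     if year < 1985 or year > 2023:
--         return None
--     return _LABELS.get((year // 5) * 5)
-- ===== Notes on version B (the rewrite author's own statement) =====
-- stated objective: simpler
-- what changed: Replaced the linear scan over eight (lo,hi) range tuples with a range guard plus direct bucket arithmetic ((year // 5) * 5) and a single dict lookup keyed by bucket start.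
import Mathlib
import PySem

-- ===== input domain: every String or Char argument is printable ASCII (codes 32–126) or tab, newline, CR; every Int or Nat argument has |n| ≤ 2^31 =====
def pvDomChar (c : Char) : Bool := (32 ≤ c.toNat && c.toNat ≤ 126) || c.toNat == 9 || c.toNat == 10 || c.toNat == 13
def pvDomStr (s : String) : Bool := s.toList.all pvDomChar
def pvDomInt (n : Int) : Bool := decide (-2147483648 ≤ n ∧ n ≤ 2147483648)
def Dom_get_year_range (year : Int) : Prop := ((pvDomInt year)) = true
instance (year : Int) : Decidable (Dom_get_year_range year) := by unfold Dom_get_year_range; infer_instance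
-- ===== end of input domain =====

-- B replaces A's linear scan over eight range tuples with a range guard plus
-- direct bucket arithmetic ((year // 5) * 5) and a single dict lookup (simpler).


-- ===== PORT A =====
-- A's dict of ((lo, hi), name) items in insertion order
def rangesA : List ((Int × Int) × String) :=
  [((1985, 1989), "1985_1989"),
   ((1990, 1994), "1990_1994"),
   ((1995, 1999), "1995_1999"),
   ((2000, 2004), "2000_2004"),
   ((2005, 2009), "2005_2009"),
   ((2010, 2014), "2010_2014"),
   ((2015, 2019), "2015_2019"),
   ((2020, 2023), "2020_2023")]

-- the for-loop with early return
def loopA (year : Int) : List ((Int × Int) × String) → Option String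
  | [] => none
  | (t, name) :: rest =>
      if t.1 ≤ year ∧ year ≤ t.2 then some name else loopA year rest

def get_year_range (year : Int) : Option String := loopA year rangesA

-- ===== PORT B =====
def labelsB : PySem.Dict Int String := PySem.Dict.ofList
  [(1985, "1985_1989"), (1990, "1990_1994"), (1995, "1995_1999"),
   (2000, "2000_2004"), (2005, "2005_2009"), (2010, "2010_2014"),
   (2015, "2015_2019"), (2020, "2020_2023")]

def get_year_range_alt (year : Int) : Option String :=
  if year < 1985 ∨ year > 2023 then none
  else PySem.Dict.get? labelsB (PySem.Int.floordiv year 5 * 5)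

-- ===== PRECONDITION & SPEC =====
def Spec_get_year_range (year : Int) (out : Option String) : Prop := out = get_year_range_alt year
instance (year : Int) (out : Option String) : Decidable (Spec_get_year_range year out) := by unfold Spec_get_year_range; infer_instance

-- ===== CLAIM (what is proved, stated in full; the proofs are below) =====
def Claim_equal_get_year_range : Prop := ∀ (year : Int), Dom_get_year_range year → Spec_get_year_range year (get_year_range year)

-- ===== LEMMAS AND PROOFS =====

-- ===== VERDICT (by name: the statement is the Claim_ definition above) =====
theorem get_year_range_spec : Claim_equal_get_year_range := by
  intro year _
  unfold Spec_get_year_range get_year_range get_year_range_alt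
  by_cases h : 1985 ≤ year ∧ year ≤ 2023
  · have h1 := h.1; have h2 := h.2
    interval_cases year <;> decide
  · have hout : year < 1985 ∨ year > 2023 := by omega
    rw [if_pos hout]
    simp only [rangesA, loopA]
    split_ifs with h1 h2 h3 h4 h5 h6 h7 h8 <;> first | rfl | omega
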